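-- pv_equiv track=rewrite | github.com/alexmcgowen/taskman | taskman.py | createFlags
-- ===== SOURCE A (Python) =====
-- def createFlags(cmd,branch):
--         flags = cmd[cmd.find(branch):][1:].split(':') # replace ' mod' with a function input!
--         c = 0
--         KVPs = []
--         while c < len(flags):
--                 if c == 0:
--                         k = flags[c].split(' ')[-1]
--
--                 elif (c + 1) < len(flags):
--                         v = ' '.join(flags[c].split(' ')[:-1])
--                         KVPs.append(k+':'+v)
--                         k = flags[c].split(' ')[-1]
--                 else:
--                         v = flags[c]
--                         KVPs.append(k+':'+v)
--                 c += 1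
--         return(KVPs)
-- ===== SOURCE B (Python) =====
-- def createFlags(cmd, branch):
--     flags = cmd[cmd.find(branch):][1:].split(':')
--     return _zipKVPs(flags)
--
--
-- def _zipKVPs(flags):
--     keys = [seg.split(' ')[-1] for seg in flags[:-1]]
--     values = [' '.join(seg.split(' ')[:-1]) for seg in flags[1:-1]] + flags[-1:]
--     return [k + ':' + v for k, v in zip(keys, values)]
-- ===== Notes on version B (the rewrite author's own statement) =====
-- stated objective: simpler
-- what changed: Replaced A's stateful while-loop over indices (threading the running key k and index comparisons to pick the branch) with a stateless two-pass build: a list of keys from flags[:-1], a list of values from flags[1:-1] plus the whole last segment, joined by zip.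
import Mathlib
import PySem

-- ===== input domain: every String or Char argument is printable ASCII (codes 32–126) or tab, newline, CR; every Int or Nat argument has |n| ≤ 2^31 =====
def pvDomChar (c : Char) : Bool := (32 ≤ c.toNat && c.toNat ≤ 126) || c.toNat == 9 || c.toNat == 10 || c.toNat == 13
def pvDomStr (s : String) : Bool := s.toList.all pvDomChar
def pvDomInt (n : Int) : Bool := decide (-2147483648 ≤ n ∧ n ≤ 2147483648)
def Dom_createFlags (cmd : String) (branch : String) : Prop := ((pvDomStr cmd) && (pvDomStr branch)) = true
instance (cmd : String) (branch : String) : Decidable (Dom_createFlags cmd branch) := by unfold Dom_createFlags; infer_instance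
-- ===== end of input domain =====

-- B replaces A's stateful index loop (which threads the running key `k`) by a stateless
-- build of a key list and a value list followed by a zip; same cost, different decomposition.

-- ===== PORT A =====
-- the body of A's while-loop; state = (k, KVPs), c the loop index
def aStep (flags : List String) (st : String × List String) (c : Int) : String × List String :=
  if c == 0 then
    (PySem.List.pyGetD ((PySem.Str.split? (PySem.List.pyGetD flags c "") " ").getD []) (-1) "", st.2)
  else if c + 1 < (flags.length : Int) then
    (PySem.List.pyGetD ((PySem.Str.split? (PySem.List.pyGetD flags c "") " ").getD []) (-1) "",
     st.2 ++ [st.1 ++ ":" ++ PySem.Str.join " " (PySem.List.slice ((PySem.Str.split? (PySem.List.pyGetD flags c "") " ").getD []) none (some (-1)))])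
  else
    (st.1, st.2 ++ [st.1 ++ ":" ++ PySem.List.pyGetD flags c ""])

def createFlags (cmd : String) (branch : String) : List String :=
  let flags : List String :=
    (PySem.Str.split? (PySem.Str.slice (PySem.Str.slice cmd (some (PySem.Str.find cmd branch))) (some 1)) ":").getD []
  ((PySem.List.pyRange 0 (flags.length : Int)).foldl (aStep flags) ("", [])).2

-- ===== PORT B =====
-- Source B's _zipKVPs: keys and values built in separate passes, then zipped
def zipKVPs (flags : List String) : List String :=
  let keys := (PySem.List.slice flags none (some (-1))).map
      (fun seg => PySem.List.pyGetD ((PySem.Str.split? seg " ").getD []) (-1) "")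
  let values := (PySem.List.slice flags (some 1) (some (-1))).map
      (fun seg => PySem.Str.join " " (PySem.List.slice ((PySem.Str.split? seg " ").getD []) none (some (-1))))
      ++ PySem.List.slice flags (some (-1))
  (keys.zip values).map (fun p => p.1 ++ ":" ++ p.2)

def createFlags_alt (cmd : String) (branch : String) : List String :=
  let flags : List String :=
    (PySem.Str.split? (PySem.Str.slice (PySem.Str.slice cmd (some (PySem.Str.find cmd branch))) (some 1)) ":").getD []
  zipKVPs flags

-- ===== PRECONDITION & SPEC =====
def Spec_createFlags (cmd : String) (branch : String) (out : List String) : Prop := out = createFlags_alt cmd branch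
instance (cmd : String) (branch : String) (out : List String) : Decidable (Spec_createFlags cmd branch out) := by unfold Spec_createFlags; infer_instance

-- ===== CLAIM (what is proved, stated in full; the proofs are below) =====
def Claim_equal_createFlags : Prop := ∀ (cmd : String) (branch : String), Dom_createFlags cmd branch → Spec_createFlags cmd branch (createFlags cmd branch)

-- ===== LEMMAS AND PROOFS =====

-- last word of a segment: flags[c].split(' ')[-1]
def pvL (s : String) : String :=
  PySem.List.pyGetD ((PySem.Str.split? s " ").getD []) (-1) ""

-- all-but-last words rejoined: ' '.join(flags[c].split(' ')[:-1])
def pvJ (s : String) : String :=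
  PySem.Str.join " " (PySem.List.slice ((PySem.Str.split? s " ").getD []) none (some (-1)))

-- common characterisation of both programs: the pairs produced once the running key is k
-- and the remaining segments are the list argument
def pvCombine : String → List String → List String
  | _, [] => []
  | k, [x] => [k ++ ":" ++ x]
  | k, x :: y :: t => (k ++ ":" ++ pvJ x) :: pvCombine (pvL x) (y :: t)

lemma slice_one_neg_one {α : Type} (xs : List α) :
    PySem.List.slice xs (some 1) (some (-1)) = xs.tail.dropLast := by
  simp only [PySem.List.slice, Int.reduceNeg, Order.lt_one_iff, PySem.List.clampIdx_neg_ofNat,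
    zero_le_one, PySem.List.clampIdx_of_nonneg, Int.toNat_one]
  cases xs with
  | nil => simp
  | cons x t => simp [List.dropLast_eq_take]

lemma pyRange_nil (a b : Int) (h : b ≤ a) : PySem.List.pyRange a b = [] := by
  simp [PySem.List.pyRange]; omega

-- invariant of A's while-loop from index a ≥ 1 on: it appends pvCombine k (flags[a:])
lemma aLoop (flags : List String) : ∀ (t : List String) (a : Nat) (k : String) (acc : List String),
    1 ≤ a → flags.drop a = t →
    ((PySem.List.pyRange (a : Int) (flags.length : Int)).foldl (aStep flags) (k, acc)).2
      = acc ++ pvCombine k t := by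
  intro t
  induction t with
  | nil =>
    intro a k acc ha hd
    rw [pyRange_nil _ _ (by exact_mod_cast List.drop_eq_nil_iff.mp hd)]
    simp [pvCombine]
  | cons x xs ih =>
    intro a k acc ha hd
    have ha' : a < flags.length := by
      by_contra h
      rw [List.drop_eq_nil_of_le (by omega)] at hd
      simp at hd
    have hget : PySem.List.pyGetD flags (a : Int) "" = x := by
      rw [PySem.List.pyGetD_eq_getElem flags "" (by positivity) (by exact_mod_cast ha')]
      have := List.getElem_drop (xs := flags) (i := a) (j := 0) (h := by simpa using ha')
      simp [hd] at this
      simpa using this.symm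
    rw [PySem.List.pyRange_one_cons (by exact_mod_cast ha'), List.foldl_cons]
    have hne : ((a : Int) == 0) = false := by simp; omega
    cases xs with
    | nil =>
      have hlen : flags.length = a + 1 := by
        have : flags.drop (a+1) = [] := by
          have := congrArg List.tail hd; simpa [← List.drop_succ_cons, List.tail_drop] using this
        have := List.drop_eq_nil_iff.mp this
        omega
      have hnlt : ¬ ((a : Int) + 1 < (flags.length : Int)) := by
        rw [hlen]; push_cast; omega
      rw [aStep]
      simp only [hne, Bool.false_eq_true, if_false, if_neg hnlt, hget]
      rw [pyRange_nil _ _ (by rw [hlen]; push_cast; omega)]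
      simp [pvCombine]
    | cons y ys =>
      have hd' : flags.drop (a+1) = y :: ys := by
        have := congrArg List.tail hd; simpa [List.tail_drop] using this
      have hlt : ((a : Int) + 1 < (flags.length : Int)) := by
        have : a + 1 < flags.length := by
          by_contra h
          rw [List.drop_eq_nil_of_le (by omega)] at hd'
          simp at hd'
        exact_mod_cast this
      rw [aStep]
      simp only [hne, Bool.false_eq_true, if_false, if_pos hlt, hget]
      have : ((a : Int) + 1) = ((a + 1 : Nat) : Int) := by push_cast; ring
      rw [this, ih (a+1) _ _ (by omega) hd']
      simp [pvCombine, pvL, pvJ]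

-- B's zip of the two passes computes the same pvCombine characterisation
lemma bAux : ∀ (rest : List String) (g : String), zipKVPs (g :: rest) = pvCombine (pvL g) rest := by
  intro rest
  induction rest with
  | nil =>
    intro g
    simp [zipKVPs, pvCombine, PySem.List.slice_to_neg_one, slice_one_neg_one, PySem.List.slice_from_neg_one]
  | cons x t ih =>
    intro g
    cases t with
    | nil =>
      simp [zipKVPs, pvCombine, pvL, PySem.List.slice_to_neg_one, slice_one_neg_one, PySem.List.slice_from_neg_one]
    | cons y ys =>
      have hih := ih x
      simp only [zipKVPs, pvCombine, PySem.List.slice_to_neg_one, slice_one_neg_one, PySem.List.slice_from_neg_one] at hih ⊢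
      simp only [List.dropLast_cons₂, List.map_cons, List.tail_cons, List.length_cons] at hih ⊢
      simp [pvL, pvJ] at hih ⊢
      rw [← hih]
      exact ⟨by rw [PySem.List.slice_to_neg_one], rfl⟩

lemma ab_eq (flags : List String) :
    ((PySem.List.pyRange 0 (flags.length : Int)).foldl (aStep flags) ("", [])).2
      = zipKVPs flags := by
  cases flags with
  | nil => simp [zipKVPs]; exact Or.inl (PySem.List.slice_to_neg_one [])
  | cons g rest =>
    rw [bAux]
    have h0 : (0:Int) < ((g::rest).length : Int) := by simp
    rw [PySem.List.pyRange_one_cons h0, List.foldl_cons]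
    have hstep : aStep (g::rest) ("", []) 0 = (pvL g, []) := by
      simp [aStep, pvL, PySem.List.pyGetD_zero_cons]
    rw [hstep]
    have h1 : ((0:Int)+1) = ((1:Nat):Int) := by norm_num
    rw [h1, aLoop (g::rest) rest 1 _ _ (le_refl 1) (by simp)]
    simp

-- ===== VERDICT (by name: the statement is the Claim_ definition above) =====
theorem createFlags_spec : Claim_equal_createFlags := by
  intro cmd branch _
  unfold Spec_createFlags createFlags createFlags_alt
  exact ab_eq _
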